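-- pv_equiv track=rewrite | github.com/mauricioprb/otimizacao-computacional | trabalho02/escalonador_sistemas.py | retorna_coeficiente
-- ===== SOURCE A (Python) =====
-- def retorna_coeficiente(linha, pos):
--     valor = []
--     pc = pos-1
--
--     while pc >= 0:
--         if linha[pc] == '+' or linha[pc] == '-':
--             if linha[pc] == '-':
--                 valor.append(linha[pc])  # Fez append com o '-'
--                 if len(valor) == 1:
--                     valor.insert(0, '1')
--                 break
--             else:
--                 if len(valor) == 0:
--                     valor.append('1')
--                 break
--
--         valor.append(linha[pc])
--         pc = pc-1  # Andar para a esquerda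
--
--     valor.reverse()
--
--     return ''.join(valor)
-- ===== SOURCE B (Python) =====
-- def retorna_coeficiente(linha, pos):
--     # Scan left only to locate the first '+'/'-' boundary, then return one slice.
--     pc = pos - 1
--     sinal = None
--     while pc >= 0:
--         c = linha[pc]
--         if c == '+' or c == '-':
--             sinal = c
--             break
--         pc -= 1
--     if sinal is None:
--         return linha[0:pos] if pos > 0 else ''
--     corpo = linha[pc+1:pos]
--     if sinal == '-':
--         return '-' + corpo if corpo else '-1'
--     return corpo if corpo else '1'
-- ===== Notes on version B (the rewrite author's own statement) =====
-- stated objective: simpler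
-- what changed: Replaces the char-by-char accumulator list (append per character, insert, reverse, join) with a boundary search: the backward loop only locates the first '+'/'-', and the result is a single slice linha[pc+1:pos] with the sign/empty cases handled once after the loop.
import Mathlib
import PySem

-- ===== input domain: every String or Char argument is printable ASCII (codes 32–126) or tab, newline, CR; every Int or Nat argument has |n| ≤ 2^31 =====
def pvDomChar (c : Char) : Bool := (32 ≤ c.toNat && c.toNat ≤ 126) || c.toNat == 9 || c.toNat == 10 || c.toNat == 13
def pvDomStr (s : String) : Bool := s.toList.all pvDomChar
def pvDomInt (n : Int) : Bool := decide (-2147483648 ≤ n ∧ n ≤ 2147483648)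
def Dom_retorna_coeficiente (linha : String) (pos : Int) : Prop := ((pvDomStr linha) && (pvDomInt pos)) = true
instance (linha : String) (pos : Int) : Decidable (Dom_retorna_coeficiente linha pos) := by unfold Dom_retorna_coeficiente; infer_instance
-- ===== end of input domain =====

-- B replaces A's char-by-char accumulator (append/insert/reverse/join) by a boundary search plus one slice; objective: simpler.

-- ===== PORT A =====
def pvLoopA (s : List Char) (pc : Int) (valor : List Char) : List Char :=
  if _h : 0 ≤ pc then
    match PySem.List.pyGet? s pc with
    | none => valor          -- IndexError (excluded by Pre_)
    | some c =>
      if c = '+' ∨ c = '-' then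
        if c = '-' then
          let v := valor ++ [c]
          if v.length = 1 then '1' :: v else v
        else
          if valor.length = 0 then valor ++ ['1'] else valor
      else
        pvLoopA s (pc - 1) (valor ++ [c])
  else valor
termination_by (pc + 1).toNat
decreasing_by omega

def retorna_coeficiente (linha : String) (pos : Int) : String :=
  String.ofList ((pvLoopA linha.toList (pos - 1) []).reverse)

-- ===== PORT B =====
def pvFindSign (s : List Char) (pc : Int) : Option (Int × Char) :=
  if _h : 0 ≤ pc then
    match PySem.List.pyGet? s pc with
    | none => none           -- IndexError (excluded by Pre_)
    | some c => if c = '+' ∨ c = '-' then some (pc, c) else pvFindSign s (pc - 1)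
  else none
termination_by (pc + 1).toNat
decreasing_by omega

def retorna_coeficiente_alt (linha : String) (pos : Int) : String :=
  match pvFindSign linha.toList (pos - 1) with
  | none => if 0 < pos then String.ofList (PySem.List.slice linha.toList (some 0) (some pos)) else ""
  | some (pc, c) =>
    let corpo := PySem.List.slice linha.toList (some (pc + 1)) (some pos)
    if c = '-' then (if corpo = [] then "-1" else String.ofList ('-' :: corpo))
    else (if corpo = [] then "1" else String.ofList corpo)

-- ===== PRECONDITION & SPEC =====
-- Pre_ excludes exactly pos > len(linha), where A (and B) raise IndexError at linha[pos-1].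
def Pre_retorna_coeficiente (linha : String) (pos : Int) : Prop :=
  pos ≤ (linha.toList.length : Int)
instance (linha : String) (pos : Int) : Decidable (Pre_retorna_coeficiente linha pos) := by
  unfold Pre_retorna_coeficiente; infer_instance

def pvWitness_retorna_coeficiente : String × Int := ("x+3y", 3)

def Spec_retorna_coeficiente (linha : String) (pos : Int) (out : String) : Prop := out = retorna_coeficiente_alt linha pos
instance (linha : String) (pos : Int) (out : String) : Decidable (Spec_retorna_coeficiente linha pos out) := by unfold Spec_retorna_coeficiente; infer_instance

-- ===== CLAIM (what is proved, stated in full; the proofs are below) =====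
def Claim_equal_retorna_coeficiente : Prop := ∀ (linha : String) (pos : Int), Dom_retorna_coeficiente linha pos → Pre_retorna_coeficiente linha pos → Spec_retorna_coeficiente linha pos (retorna_coeficiente linha pos)

-- ===== LEMMAS AND PROOFS =====

lemma pvGet_nat (s : List Char) (n : Nat) (h : n < s.length) :
    PySem.List.pyGet? s (n : Int) = some s[n] := by
  simp [h]

lemma loopA_neg (s : List Char) (pc : Int) (h : pc < 0) (valor : List Char) :
    pvLoopA s pc valor = valor := by
  rw [pvLoopA]; simp [show ¬ (0 ≤ pc) by omega]

lemma findSign_neg (s : List Char) (pc : Int) (h : pc < 0) :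
    pvFindSign s pc = none := by
  rw [pvFindSign]; simp [show ¬ (0 ≤ pc) by omega]

lemma loopA_step (s : List Char) (n : Nat) (hn : n < s.length) (valor : List Char) :
    pvLoopA s (n : Int) valor =
      if s[n] = '+' ∨ s[n] = '-' then
        (if s[n] = '-' then
          (if (valor ++ [s[n]]).length = 1 then '1' :: (valor ++ [s[n]]) else valor ++ [s[n]])
         else (if valor.length = 0 then valor ++ ['1'] else valor))
      else pvLoopA s ((n : Int) - 1) (valor ++ [s[n]]) := by
  rw [pvLoopA, pvGet_nat s n hn]
  simp

lemma findSign_step (s : List Char) (n : Nat) (hn : n < s.length) :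
    pvFindSign s (n : Int) =
      if s[n] = '+' ∨ s[n] = '-' then some ((n : Int), s[n])
      else pvFindSign s ((n : Int) - 1) := by
  rw [pvFindSign, pvGet_nat s n hn]
  simp

lemma findSign_bound (s : List Char) (n : Nat) (hn : n < s.length) (q : Int) (c : Char)
    (h : pvFindSign s (n : Int) = some (q, c)) : ∃ m : Nat, q = (m : Int) ∧ m ≤ n := by
  induction n with
  | zero =>
    rw [findSign_step s 0 hn] at h
    by_cases hs : s[0] = '+' ∨ s[0] = '-'
    · rw [if_pos hs, Option.some.injEq, Prod.mk.injEq] at h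
      exact ⟨0, h.1.symm, le_refl 0⟩
    · rw [if_neg hs, findSign_neg s _ (by omega)] at h
      cases h
  | succ m ih =>
    rw [findSign_step s (m+1) hn] at h
    by_cases hs : s[m+1] = '+' ∨ s[m+1] = '-'
    · rw [if_pos hs, Option.some.injEq, Prod.mk.injEq] at h
      exact ⟨m+1, h.1.symm, le_refl _⟩
    · rw [if_neg hs, show ((m+1 : Nat) : Int) - 1 = (m : Int) by push_cast; ring] at h
      obtain ⟨k, hk, hkm⟩ := ih (by omega) h
      exact ⟨k, hk, by omega⟩

lemma loop_none (s : List Char) (n : Nat) (hn : n < s.length) (valor : List Char)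
    (hf : pvFindSign s (n : Int) = none) :
    pvLoopA s (n : Int) valor = valor ++ (s.take (n + 1)).reverse := by
  induction n generalizing valor with
  | zero =>
    rw [findSign_step s 0 hn] at hf
    by_cases hs : s[0] = '+' ∨ s[0] = '-'
    · rw [if_pos hs] at hf; cases hf
    · rw [loopA_step s 0 hn, if_neg hs, loopA_neg s _ (by omega)]
      simp [List.take_add_one, List.getElem?_eq_getElem hn]
  | succ m ih =>
    rw [findSign_step s (m+1) hn] at hf
    by_cases hs : s[m+1] = '+' ∨ s[m+1] = '-'
    · rw [if_pos hs] at hf; cases hf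
    · rw [if_neg hs] at hf
      rw [loopA_step s (m+1) hn, if_neg hs]
      have hc : ((m+1 : Nat) : Int) - 1 = (m : Int) := by push_cast; ring
      rw [hc] at hf ⊢
      rw [ih (by omega) _ hf]
      have ht : List.take (m+1+1) s = List.take (m+1) s ++ [s[m+1]] := by
        rw [List.take_add_one, List.getElem?_eq_getElem hn]
        rfl
      rw [ht, List.reverse_append]
      simp only [List.reverse_cons, List.reverse_nil, List.nil_append,
        List.cons_append, List.append_assoc]

lemma loop_some (s : List Char) (n : Nat) (hn : n < s.length) (valor : List Char)
    (q : Nat) (c : Char)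
    (hf : pvFindSign s (n : Int) = some ((q : Int), c)) :
    pvLoopA s (n : Int) valor =
      (if c = '-' then
         (if (valor ++ ((s.drop (q + 1)).take (n - q)).reverse ++ ['-']).length = 1 then
            '1' :: (valor ++ ((s.drop (q + 1)).take (n - q)).reverse ++ ['-'])
          else valor ++ ((s.drop (q + 1)).take (n - q)).reverse ++ ['-'])
       else
         (if valor ++ ((s.drop (q + 1)).take (n - q)).reverse = [] then ['1']
          else valor ++ ((s.drop (q + 1)).take (n - q)).reverse)) := by
  induction n generalizing valor with
  | zero =>
    rw [findSign_step s 0 hn] at hf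
    by_cases hs : s[0] = '+' ∨ s[0] = '-'
    · rw [if_pos hs, Option.some.injEq, Prod.mk.injEq] at hf
      obtain ⟨h1, h2⟩ := hf
      have hq0 : q = 0 := by exact_mod_cast h1.symm
      subst hq0
      rw [loopA_step s 0 hn, if_pos hs]
      subst h2
      simp only [Nat.sub_self, List.take_zero, List.reverse_nil, List.append_nil]
      by_cases hm : s[0] = '-'
      · rw [if_pos hm, if_pos hm, hm]
      · rw [if_neg hm, if_neg hm]
        simp only [List.length_eq_zero_iff]
        split_ifs with hv
        · subst hv; rfl
        · rfl
    · rw [if_neg hs, findSign_neg s _ (by omega)] at hf; cases hf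
  | succ m ih =>
    rw [findSign_step s (m+1) hn] at hf
    by_cases hs : s[m+1] = '+' ∨ s[m+1] = '-'
    · rw [if_pos hs, Option.some.injEq, Prod.mk.injEq] at hf
      obtain ⟨h1, h2⟩ := hf
      have hq : q = m + 1 := by exact_mod_cast h1.symm
      subst hq
      rw [loopA_step s (m+1) hn, if_pos hs]
      subst h2
      simp only [Nat.sub_self, List.take_zero, List.reverse_nil, List.append_nil]
      by_cases hm2 : s[m+1] = '-'
      · rw [if_pos hm2, if_pos hm2, hm2]
      · rw [if_neg hm2, if_neg hm2]
        simp only [List.length_eq_zero_iff]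
        split_ifs with hv
        · subst hv; rfl
        · rfl
    · rw [if_neg hs] at hf
      have hc : ((m+1 : Nat) : Int) - 1 = (m : Int) := by push_cast; ring
      rw [hc] at hf
      have hqm : q ≤ m := by
        obtain ⟨k, hk, hkm⟩ := findSign_bound s m (by omega) _ _ hf
        have : q = k := by exact_mod_cast hk
        omega
      rw [loopA_step s (m+1) hn, if_neg hs, hc, ih (by omega) _ hf]
      have hmid : (s.drop (q + 1)).take (m + 1 - q) =
          (s.drop (q + 1)).take (m - q) ++ [s[m+1]] := by
        rw [show m + 1 - q = (m - q) + 1 by omega, List.take_add_one]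
        congr 1
        rw [List.getElem?_drop]
        rw [show q + 1 + (m - q) = m + 1 by omega]
        simp [List.getElem?_eq_getElem hn]
      rw [hmid]
      simp [List.append_assoc]

-- ===== VERDICT =====
theorem retorna_coeficiente_spec : Claim_equal_retorna_coeficiente := by
  intro linha pos _hdom hpre
  unfold Spec_retorna_coeficiente retorna_coeficiente retorna_coeficiente_alt
  unfold Pre_retorna_coeficiente at hpre
  by_cases hp : 0 < pos
  · have hcast : pos - 1 = ((pos.toNat - 1 : Nat) : Int) := by omega
    rw [hcast]
    have hnlen : pos.toNat - 1 < linha.toList.length := by omega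
    cases hfs : pvFindSign linha.toList ((pos.toNat - 1 : Nat) : Int) with
    | none =>
      rw [loop_none _ _ hnlen [] hfs]
      simp only [List.nil_append, List.reverse_reverse]
      rw [if_pos hp, PySem.List.slice_zero_start, PySem.List.slice_to _ (le_of_lt hp)]
      rw [show pos.toNat - 1 + 1 = pos.toNat by omega]
    | some qc =>
      obtain ⟨qI, c⟩ := qc
      obtain ⟨q, rfl, hq⟩ := findSign_bound _ _ hnlen qI c hfs
      rw [loop_some _ _ hnlen [] q c hfs]
      have hcorpo : PySem.List.slice linha.toList (some ((q : Int) + 1)) (some pos) =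
          (linha.toList.drop (q + 1)).take (pos.toNat - 1 - q) := by
        rw [PySem.List.slice_toNat _ (by omega) (by omega)]
        have h2 : pos.toNat - ((q : Int) + 1).toNat = pos.toNat - 1 - q := by omega
        have h1 : ((q : Int) + 1).toNat = q + 1 := by omega
        rw [h2, h1]
      simp only [hcorpo, List.nil_append]
      by_cases hc : c = '-'
      · rw [if_pos hc, if_pos hc]
        by_cases hmid : (linha.toList.drop (q + 1)).take (pos.toNat - 1 - q) = []
        · rw [hmid]
          simp
        · have hne : ¬ ((((linha.toList.drop (q + 1)).take (pos.toNat - 1 - q)).reverse ++ ['-']).length = 1) := by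
            intro h
            simp only [List.length_append, List.length_reverse, List.length_cons,
              List.length_nil] at h
            exact hmid (List.length_eq_zero_iff.mp (by omega))
          rw [if_neg hne, if_neg hmid]
          simp
      · rw [if_neg hc, if_neg hc]
        by_cases hmid : (linha.toList.drop (q + 1)).take (pos.toNat - 1 - q) = []
        · rw [hmid]
          simp
        · rw [if_neg (by simpa using hmid), if_neg hmid]
          simp
  · have h1 : pos - 1 < 0 := by omega
    rw [loopA_neg _ _ h1, findSign_neg _ _ h1]
    simp [hp]
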